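-- pv_equiv track=rewrite | github.com/kimt33/fanpy | wfns/upgrades/temp/sign.py | sign_excite_one
-- ===== SOURCE A (Python) =====
-- def sign_excite_one(occ_indices, vir_indices):
--     num_occ = len(occ_indices)
--
--     bins = [[] for j in range(num_occ + 1)]
--     # assume occ_indices is ordered
--     # assume vir_indices is ordered
--     counter = 0
--     for a in vir_indices:
--         while counter < num_occ and a > occ_indices[counter]:
--             counter += 1
--         bins[counter].append(a)
--
--     output = []
--     for i in range(num_occ):
--         # i is the position in the occ_indices
--         for j in range(num_occ + 1):
--             # j is the position of the spaces beween occ_indices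
--             # 0 is the space before index 0
--             # 1 is the space between indices 0 and 1,
--             # n is the space after n-1
--             num_jumps = i + j
--             if j > i:
--                 num_jumps -= 1
--             if num_jumps % 2 == 0:
--                 output += [1] * len(bins[j])
--             else:
--                 output += [-1] * len(bins[j])
--             # if j <= i:
--             #     output.append((-1) ** (i + j))
--             # else:
--             #     output.append((-1) ** (i + j - 1))
--
--             # for a in bins[j]:
--             #     output.append(sign)
--     return output
-- ===== SOURCE B (Python) =====
-- def sign_excite_one(occ_indices, vir_indices):
--     num_occ = len(occ_indices)
--     # One merge-style pass: gap index for each virtual index, in order.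
--     js = []
--     counter = 0
--     for a in vir_indices:
--         while counter < num_occ and a > occ_indices[counter]:
--             counter += 1
--         js.append(counter)
--     # Gap indices are already nondecreasing, so no binning/flattening is
--     # needed; the sign is the closed form 1 - 2*((i + j - (j > i)) % 2).
--     return [1 - 2 * ((i + j - (j > i)) % 2) for i in range(num_occ) for j in js]
-- ===== Notes on version B (the rewrite author's own statement) =====
-- stated objective: faster
-- what changed: B drops A's bins-of-lists and the per-row scan over all num_occ+1 gaps (with list replication per bin): one merge pass records each virtual index's gap position (already nondecreasing), and the output is a flat comprehension with a closed-form sign 1-2*((i+j-(j>i))%2) per (row, gap) pair.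
import Mathlib
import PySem

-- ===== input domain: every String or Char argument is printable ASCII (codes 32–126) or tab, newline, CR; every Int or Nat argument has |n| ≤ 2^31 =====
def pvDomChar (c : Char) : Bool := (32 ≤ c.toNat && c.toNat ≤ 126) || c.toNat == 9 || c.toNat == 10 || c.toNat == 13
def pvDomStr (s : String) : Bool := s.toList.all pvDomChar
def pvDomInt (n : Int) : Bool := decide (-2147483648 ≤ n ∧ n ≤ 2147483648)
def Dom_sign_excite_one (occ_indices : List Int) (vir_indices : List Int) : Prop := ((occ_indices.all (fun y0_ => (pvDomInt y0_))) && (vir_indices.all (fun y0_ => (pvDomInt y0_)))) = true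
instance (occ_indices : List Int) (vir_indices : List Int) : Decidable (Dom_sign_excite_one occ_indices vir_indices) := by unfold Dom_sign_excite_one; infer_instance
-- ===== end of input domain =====

-- B replaces A's bins-of-lists plus per-row scan over all num_occ+1 gaps by one merge
-- pass recording each virtual's gap index and a closed-form sign per (i, gap) pair
-- (objective: faster — no per-row scan over empty gaps, no list replication).

-- ===== PORT A =====
-- the `while counter < num_occ and a > occ_indices[counter]: counter += 1` loop
-- (identical in A and in B, so shared)
def pvAdvance (occ : List Int) (a : Int) (c : Nat) : Nat :=
  if h : c < occ.length ∧ occ.getD c 0 < a then pvAdvance occ a (c + 1) else c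
termination_by occ.length - c
decreasing_by omega

def sign_excite_one (occ_indices : List Int) (vir_indices : List Int) : List Int :=
  let num_occ := occ_indices.length
  -- bins = [[] for j in range(num_occ+1)]; for a in vir: advance counter; bins[counter].append(a)
  let st := vir_indices.foldl
    (fun (s : List (List Int) × Nat) a =>
      let c := pvAdvance occ_indices a s.2
      (s.1.set c (s.1.getD c [] ++ [a]), c))
    (List.replicate (num_occ + 1) [], 0)
  let bins := st.1
  (List.range num_occ).foldl (fun output i =>
    (List.range (num_occ + 1)).foldl (fun output j =>
      let num_jumps := i + j - (if j > i then 1 else 0)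
      if num_jumps % 2 == 0 then
        output ++ List.replicate (bins.getD j []).length 1
      else
        output ++ List.replicate (bins.getD j []).length (-1)) output) []

-- ===== PORT B =====
def sign_excite_one_alt (occ_indices : List Int) (vir_indices : List Int) : List Int :=
  let num_occ := occ_indices.length
  -- js = []; for a in vir: advance counter; js.append(counter)
  let st := vir_indices.foldl
    (fun (s : List Nat × Nat) a =>
      let c := pvAdvance occ_indices a s.2
      (s.1 ++ [c], c))
    ([], 0)
  let js := st.1
  (List.range num_occ).flatMap (fun i =>
    js.map (fun j => 1 - 2 * (((i + j - (if j > i then 1 else 0)) % 2 : Nat) : Int)))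

-- ===== PRECONDITION & SPEC =====
def Spec_sign_excite_one (occ_indices : List Int) (vir_indices : List Int) (out : List Int) : Prop := out = sign_excite_one_alt occ_indices vir_indices
instance (occ_indices : List Int) (vir_indices : List Int) (out : List Int) : Decidable (Spec_sign_excite_one occ_indices vir_indices out) := by unfold Spec_sign_excite_one; infer_instance

-- ===== CLAIM (what is proved, stated in full; the proofs are below) =====
def Claim_equal_sign_excite_one : Prop := ∀ (occ_indices : List Int) (vir_indices : List Int), Dom_sign_excite_one occ_indices vir_indices → Spec_sign_excite_one occ_indices vir_indices (sign_excite_one occ_indices vir_indices)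

-- ===== LEMMAS AND PROOFS =====

-- G bins g = the bins flattened, each element of bins[j] contributing g j
def pvG (bs : List (List Int)) (g : Nat → Int) : List Int :=
  match bs with
  | [] => []
  | b :: bs => List.replicate b.length (g 0) ++ pvG bs (fun j => g (j + 1))

theorem pvAdvance_ge (occ : List Int) (a : Int) (c : Nat) : c ≤ pvAdvance occ a c := by
  unfold pvAdvance
  split
  · exact le_trans (Nat.le_succ c) (pvAdvance_ge occ a (c + 1))
  · exact le_refl c
termination_by occ.length - c
decreasing_by omega

theorem pvAdvance_le (occ : List Int) (a : Int) (c : Nat) (h : c ≤ occ.length) :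
    pvAdvance occ a c ≤ occ.length := by
  unfold pvAdvance
  split
  · next h' => exact pvAdvance_le occ a (c + 1) h'.1
  · exact h
termination_by occ.length - c
decreasing_by omega

theorem pvG_empty (bs : List (List Int)) (g : Nat → Int)
    (h : ∀ b ∈ bs, b = []) : pvG bs g = [] := by
  induction bs generalizing g with
  | nil => rfl
  | cons b bs ih =>
    simp [pvG, h b (by simp), ih _ (fun x hx => h x (by simp [hx]))]

theorem getD_empty_all (bs : List (List Int)) (h : ∀ j, bs.getD j [] = []) :
    ∀ b ∈ bs, b = [] := by
  intro b hb
  obtain ⟨k, hk, rfl⟩ := List.mem_iff_getElem.mp hb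
  have := h k
  simpa [List.getD, List.getElem?_eq_getElem hk] using this

theorem pvG_set (bs : List (List Int)) (c : Nat) (a : Int) (g : Nat → Int)
    (hc : c < bs.length) (hemp : ∀ j, c < j → bs.getD j [] = []) :
    pvG (bs.set c (bs.getD c [] ++ [a])) g = pvG bs g ++ [g c] := by
  induction bs generalizing c g with
  | nil => simp at hc
  | cons b bs ih =>
    cases c with
    | zero =>
      have hall : ∀ x ∈ bs, x = [] := by
        apply getD_empty_all
        intro j
        have := hemp (j + 1) (by omega)
        simpa [List.getD] using this
      simp [pvG, List.getD, pvG_empty bs _ hall, List.replicate_succ' ]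
    | succ k =>
      have hk : k < bs.length := by simpa using hc
      have hemp' : ∀ j, k < j → bs.getD j [] = [] := by
        intro j hj
        have := hemp (j + 1) (by omega)
        simpa [List.getD] using this
      simp only [List.set, List.getD, List.getElem?_cons_succ, pvG]
      rw [show (bs[k]?.getD [] : List Int) = bs.getD k [] from rfl, ih k _ hk hemp']
      simp [List.append_assoc]

-- A's range-indexed flatMap over bins equals pvG
theorem flatMap_range_eq_pvG (bs : List (List Int)) (g : Nat → Int) :
    (List.range bs.length).flatMap
      (fun j => List.replicate (bs.getD j []).length (g j)) = pvG bs g := by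
  induction bs generalizing g with
  | nil => simp [pvG]
  | cons b bs ih =>
    rw [show (b :: bs).length = bs.length + 1 from rfl, List.range_succ_eq_map]
    simp only [List.flatMap_cons, List.flatMap_map]
    simp only [List.getD, List.getElem?_cons_succ, List.getElem?_cons_zero,
      Option.getD_some]
    rw [pvG]
    congr 1
    exact ih (fun j => g (j + 1))

-- generic loop shape: foldl that only appends
theorem foldl_append_eq_flatMap {α β : Type} (l : List α) (g : α → List β) (acc : List β) :
    l.foldl (fun out x => out ++ g x) acc = acc ++ l.flatMap g := by
  induction l generalizing acc with
  | nil => simp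
  | cons x l ih => simp [List.foldl_cons, ih, List.flatMap_cons]

-- the closed-form sign equals A's branch
theorem sign_branch (l : Nat) (m : Nat) (acc : List Int) :
    (if (m % 2 == 0) then acc ++ List.replicate l (1 : Int)
     else acc ++ List.replicate l (-1 : Int))
    = acc ++ List.replicate l (1 - 2 * ((m % 2 : Nat) : Int)) := by
  rcases Nat.mod_two_eq_zero_or_one m with h | h <;> simp [h]

-- the combined fold invariant: A's bins and B's js stay in sync
theorem fold_inv (occ : List Int) (vir : List Int) :
    ∀ (bins : List (List Int)) (js : List Nat) (c : Nat),
    c ≤ occ.length → bins.length = occ.length + 1 →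
    (∀ j, c < j → bins.getD j [] = []) →
    (∀ g, pvG bins g = js.map g) →
    (let stA := vir.foldl
        (fun (s : List (List Int) × Nat) a =>
          let c := pvAdvance occ a s.2
          (s.1.set c (s.1.getD c [] ++ [a]), c)) (bins, c)
     let stB := vir.foldl
        (fun (s : List Nat × Nat) a =>
          let c := pvAdvance occ a s.2
          (s.1 ++ [c], c)) (js, c)
     stA.1.length = occ.length + 1 ∧ ∀ g, pvG stA.1 g = stB.1.map g) := by
  induction vir with
  | nil => intro bins js c _ hlen _ hrow; exact ⟨hlen, hrow⟩
  | cons a vir ih =>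
    intro bins js c hc hlen hemp hrow
    simp only [List.foldl_cons]
    have hc' : pvAdvance occ a c ≤ occ.length := pvAdvance_le occ a c hc
    have hcc : c ≤ pvAdvance occ a c := pvAdvance_ge occ a c
    apply ih
    · exact hc'
    · simp [hlen]
    · intro j hj
      rw [List.getD, List.getElem?_set_ne (by omega)]
      exact hemp j (by omega)
    · intro g
      rw [pvG_set bins (pvAdvance occ a c) a g (by omega)
            (fun j hj => hemp j (by omega)),
          hrow g, List.map_append, List.map_cons, List.map_nil]

-- ===== VERDICT (by name: the statement is the Claim_ definition above) =====
theorem sign_excite_one_spec : Claim_equal_sign_excite_one := by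
  intro occ vir _
  unfold Spec_sign_excite_one sign_excite_one sign_excite_one_alt
  simp only []
  have hinv := fold_inv occ vir (List.replicate (occ.length + 1) []) [] 0
    (by omega) (by simp)
    (by intro j _; cases h : (List.replicate (occ.length + 1) ([] : List Int)).getD j [] with
        | nil => rfl
        | cons x xs =>
          exfalso
          rcases Nat.lt_or_ge j (occ.length + 1) with hj | hj
          · rw [List.getD, List.getElem?_eq_getElem (by simpa using hj)] at h
            simp at h
          · rw [List.getD, List.getElem?_eq_none (by simpa using hj)] at h
            simp at h)
    (by intro g
        apply pvG_empty
        intro b hb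
        exact List.eq_of_mem_replicate hb)
  obtain ⟨hlen, hrow⟩ := hinv
  set stA := vir.foldl
      (fun (s : List (List Int) × Nat) a =>
        let c := pvAdvance occ a s.2
        (s.1.set c (s.1.getD c [] ++ [a]), c))
      (List.replicate (occ.length + 1) [], 0) with hA
  set stB := vir.foldl
      (fun (s : List Nat × Nat) a =>
        let c := pvAdvance occ a s.2
        (s.1 ++ [c], c)) (([] : List Nat), 0) with hB
  -- rewrite A's nested foldls into a flatMap of rows
  have row : ∀ (i : Nat) (acc : List Int),
      (List.range (occ.length + 1)).foldl (fun output j =>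
        let num_jumps := i + j - (if j > i then 1 else 0)
        if num_jumps % 2 == 0 then
          output ++ List.replicate (stA.1.getD j []).length 1
        else
          output ++ List.replicate (stA.1.getD j []).length (-1)) acc
      = acc ++ stB.1.map (fun j => 1 - 2 * (((i + j - (if j > i then 1 else 0)) % 2 : Nat) : Int)) := by
    intro i acc
    have hstep : ∀ (output : List Int) (j : Nat),
        (let num_jumps := i + j - (if j > i then 1 else 0)
         if num_jumps % 2 == 0 then
           output ++ List.replicate (stA.1.getD j []).length 1
         else
           output ++ List.replicate (stA.1.getD j []).length (-1))
        = output ++ List.replicate (stA.1.getD j []).length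
            (1 - 2 * (((i + j - (if j > i then 1 else 0)) % 2 : Nat) : Int)) := by
      intro output j
      exact sign_branch _ _ _
    calc (List.range (occ.length + 1)).foldl _ acc
        = (List.range (occ.length + 1)).foldl (fun output j =>
            output ++ List.replicate (stA.1.getD j []).length
              (1 - 2 * (((i + j - (if j > i then 1 else 0)) % 2 : Nat) : Int))) acc := by
          rw [show (fun (output : List Int) (j : Nat) =>
              (let num_jumps := i + j - (if j > i then 1 else 0)
               if num_jumps % 2 == 0 then
                 output ++ List.replicate (stA.1.getD j []).length 1
               else
                 output ++ List.replicate (stA.1.getD j []).length (-1)))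
            = (fun (output : List Int) (j : Nat) =>
                 output ++ List.replicate (stA.1.getD j []).length
                   (1 - 2 * (((i + j - (if j > i then 1 else 0)) % 2 : Nat) : Int)))
            from funext fun output => funext fun j => hstep output j]
      _ = acc ++ (List.range (occ.length + 1)).flatMap (fun j =>
            List.replicate (stA.1.getD j []).length
              (1 - 2 * (((i + j - (if j > i then 1 else 0)) % 2 : Nat) : Int))) :=
          foldl_append_eq_flatMap _ _ _
      _ = acc ++ pvG stA.1 (fun j => 1 - 2 * (((i + j - (if j > i then 1 else 0)) % 2 : Nat) : Int)) := by
          rw [← hlen]; rw [flatMap_range_eq_pvG]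
      _ = acc ++ stB.1.map (fun j => 1 - 2 * (((i + j - (if j > i then 1 else 0)) % 2 : Nat) : Int)) := by
          rw [hrow]
  -- outer loop
  have outer : ∀ (is : List Nat) (acc : List Int),
      is.foldl (fun output i =>
        (List.range (occ.length + 1)).foldl (fun output j =>
          let num_jumps := i + j - (if j > i then 1 else 0)
          if num_jumps % 2 == 0 then
            output ++ List.replicate (stA.1.getD j []).length 1
          else
            output ++ List.replicate (stA.1.getD j []).length (-1)) output) acc
      = acc ++ is.flatMap (fun i =>
          stB.1.map (fun j => 1 - 2 * (((i + j - (if j > i then 1 else 0)) % 2 : Nat) : Int))) := by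
    intro is
    induction is with
    | nil => intro acc; simp
    | cons i is ihh =>
      intro acc
      simp only [List.foldl_cons, List.flatMap_cons, row i acc, ihh]
      simp [List.append_assoc]
  simpa using outer (List.range occ.length) []
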